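-- pv_equiv track=rewrite | github.com/alex-calderwood/spindle | src/twee_utils.py | validate_link_text
-- ===== SOURCE A (Python) =====
-- INVALID_LINK_CHARACTERS = '.|[]()<>,*/\\\"\''
--
-- def validate_link_text(link):
-- 	"""
-- 	Return a validate link if the link is invalid.
-- 	If the link is valid, return None
--
-- 	# TODO if there are bad characters in a [['simple']] link, we should turn it into [['simple'|simple]]
-- 	"""
-- 	new_link = None
-- 	# Check if any of the characters are invalid
-- 	bad_chars = [c for c in link if c in INVALID_LINK_CHARACTERS]
-- 	if bad_chars:
-- 		new_link = link
-- 		for b in set(bad_chars):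
-- 			new_link = new_link.replace(b, '')
-- 	return new_link
-- ===== SOURCE B (Python) =====
-- INVALID_LINK_CHARACTERS = '.|[]()<>,*/\\\"\''
--
-- def validate_link_text(link):
-- 	cleaned = ''.join(c for c in link if c not in INVALID_LINK_CHARACTERS)
-- 	return None if cleaned == link else cleaned
-- ===== Notes on version B (the rewrite author's own statement) =====
-- stated objective: simpler
-- what changed: Replaces the collect-bad-chars-then-loop-of-replace-passes structure with a single filtering pass that builds the cleaned string once and decides None by comparing it to the input.
import Mathlib
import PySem

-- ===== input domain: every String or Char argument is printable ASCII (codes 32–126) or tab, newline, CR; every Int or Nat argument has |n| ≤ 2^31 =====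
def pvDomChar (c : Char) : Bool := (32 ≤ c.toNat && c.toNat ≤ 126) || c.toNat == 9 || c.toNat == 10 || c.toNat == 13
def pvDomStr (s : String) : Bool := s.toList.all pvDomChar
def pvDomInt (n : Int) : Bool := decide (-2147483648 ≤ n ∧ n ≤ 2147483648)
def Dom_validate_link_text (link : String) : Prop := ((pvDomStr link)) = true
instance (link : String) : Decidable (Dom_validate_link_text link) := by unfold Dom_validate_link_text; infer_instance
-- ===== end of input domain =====

-- ===== PORT A =====
-- B strips invalid characters in one filtering pass and compares to the input; objective: simpler.
-- INVALID_LINK_CHARACTERS = '.|[]()<>,*/\\\"\''  (module constant, as a char list)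
def pvInvalid : List Char := ['.', '|', '[', ']', '(', ')', '<', '>', ',', '*', '/', '\\', '"', '\'']

-- literal port of A: collect bad chars, then for each distinct bad char replace it with ''.
-- ('c in INVALID_LINK_CHARACTERS' for a single char c is membership; the fold over set(bad_chars)
--  is order-independent, since each replace removes all occurrences of one character)
def validate_link_text (link : String) : Option String :=
  let bad_chars : List Char := link.toList.filter (fun c => decide (c ∈ pvInvalid))
  if bad_chars ≠ [] then
    some ((PySem.Set.ofList bad_chars).foldl
      (fun nl b => PySem.Str.replace nl (String.ofList [b]) "") link)
  else none

-- ===== PORT B =====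
def validate_link_text_alt (link : String) : Option String :=
  let cleaned : String := String.ofList (link.toList.filter (fun c => decide (c ∉ pvInvalid)))
  if cleaned = link then none else some cleaned

-- ===== PRECONDITION & SPEC =====
def Spec_validate_link_text (link : String) (out : Option String) : Prop := out = validate_link_text_alt link
instance (link : String) (out : Option String) : Decidable (Spec_validate_link_text link out) := by unfold Spec_validate_link_text; infer_instance

-- ===== CLAIM (what is proved, stated in full; the proofs are below) =====
def Claim_equal_validate_link_text : Prop := ∀ (link : String), Dom_validate_link_text link → Spec_validate_link_text link (validate_link_text link)

-- ===== LEMMAS AND PROOFS =====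

-- replace.go with a one-char pattern and empty replacement filters that char out
theorem pv_go_single (b : Char) : ∀ (fuel : Nat) (l acc : List Char), l.length ≤ fuel →
    PySem.Chars.replace.go [b] [] fuel l acc = acc.reverse ++ l.filter (fun c => c ≠ b) := by
  intro fuel
  induction fuel with
  | zero => intro l acc h; simp at h; simp [h, PySem.Chars.replace.go]
  | succ n ih =>
    intro l acc h
    cases l with
    | nil => simp [PySem.Chars.replace.go]
    | cons c t =>
      simp only [PySem.Chars.replace.go, List.isPrefixOf]
      by_cases hcb : c = b
      · simp [hcb, ih t _ (by simpa using h)]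
      · simp [Ne.symm hcb, hcb, ih t _ (by simpa using h)]

theorem pv_replace_single (l : List Char) (b : Char) :
    PySem.Chars.replace l [b] [] = l.filter (fun c => c ≠ b) := by
  simp [PySem.Chars.replace, pv_go_single b l.length l [] le_rfl]

theorem pv_foldl_replace (S : List Char) : ∀ (l : List Char),
    S.foldl (fun nl b => nl.filter (fun c => c ≠ b)) l
      = l.filter (fun c => decide (c ∉ S)) := by
  induction S with
  | nil => intro l; simp
  | cons b S ih =>
    intro l
    simp only [List.foldl_cons, ih, List.filter_filter]
    apply List.filter_congr
    intro c _
    by_cases h1 : c = b <;> by_cases h2 : c ∈ S <;> simp [h1, h2]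

-- ===== VERDICT (by name: the statement is the Claim_ definition above) =====
theorem validate_link_text_spec : Claim_equal_validate_link_text := by
  intro link _
  unfold Spec_validate_link_text validate_link_text validate_link_text_alt
  simp only []
  set bad := link.toList.filter (fun c => decide (c ∈ pvInvalid)) with hbad
  have hfold : (PySem.Set.ofList bad).foldl
      (fun nl b => PySem.Str.replace nl (String.ofList [b]) "") link
      = String.ofList (link.toList.filter (fun c => decide (c ∉ pvInvalid))) := by
    have step : ∀ (S : List Char) (s : String),
        S.foldl (fun nl b => PySem.Str.replace nl (String.ofList [b]) "") s
          = String.ofList (S.foldl (fun nl b => nl.filter (fun c => c ≠ b)) s.toList) := by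
      intro S
      induction S with
      | nil => intro s; simp
      | cons b S ih =>
        intro s
        rw [List.foldl_cons, List.foldl_cons, ih]
        congr 1
        simp [PySem.Str.replace, pv_replace_single]
    rw [step, pv_foldl_replace]
    congr 1
    apply List.filter_congr
    intro c hc
    have hiff : c ∈ PySem.Set.ofList bad ↔ c ∈ bad := PySem.Set.mem_ofList bad c
    by_cases hcv : c ∈ pvInvalid
    · have hm : c ∈ bad := by rw [hbad]; simp [List.mem_filter, hc, hcv]
      simp [hiff.mpr hm, hcv]
    · have hm : c ∉ bad := by rw [hbad]; simp [List.mem_filter, hcv]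
      have hns : ¬ c ∈ PySem.Set.ofList bad := fun h => hm (hiff.mp h)
      simp [hns, hcv]
  by_cases hb : bad = []
  · -- no invalid chars: A returns none; B's cleaned equals link
    have hall : link.toList.filter (fun c => decide (c ∉ pvInvalid)) = link.toList := by
      apply List.filter_eq_self.mpr
      intro c hc
      by_contra hcv
      have : c ∈ bad := by rw [hbad]; simp at hcv; simp [List.mem_filter, hc, hcv]
      simp [hb] at this
    simp only [hb, ite_not, decide_not] at *
    simp [hall]
  · -- invalid chars present: cleaned is strictly shorter than link, so cleaned ≠ link
    have hne : String.ofList (link.toList.filter (fun c => decide (c ∉ pvInvalid))) ≠ link := by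
      intro heq
      have hlen : (link.toList.filter (fun c => decide (c ∉ pvInvalid))).length = link.toList.length := by
        have := congrArg (fun s => s.toList.length) heq
        simpa using this
      have hall := List.filter_eq_self.mp ((List.filter_sublist (l := link.toList)).eq_of_length hlen)
      obtain ⟨c, hcmem⟩ := List.exists_mem_of_ne_nil bad hb
      rw [hbad] at hcmem
      simp only [List.mem_filter, decide_eq_true_eq] at hcmem
      have := hall c hcmem.1
      simp [hcmem.2] at this
    simp only [decide_not] at hfold hne
    simp [hb, hfold, hne]
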